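-- pv_equiv track=rewrite | github.com/madhavimvh/madhavi | cspp1-assignments/cspp1 practice/Funny String/funny.py | funnyornot
-- ===== SOURCE A (Python) =====
-- def funnyornot(s):
-- 	rs = s[::-1]
-- 	n = len(s)
-- 	for i in range(1, n):
-- 		d1 = abs(ord(s[i]) - ord(s[i - 1]))
-- 		d2 = abs(ord(rs[i]) - ord(rs[i - 1]))
-- 		if d1 != d2:
-- 			return "Not Funny"
-- 			break
-- 	else:
-- 		return "Funny"
-- ===== SOURCE B (Python) =====
-- def funnyornot(s):
-- 	i, j = 0, len(s) - 1
-- 	while i + 1 < j: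
-- 		if abs(ord(s[i + 1]) - ord(s[i])) != abs(ord(s[j]) - ord(s[j - 1])):
-- 			return "Not Funny"
-- 		i += 1
-- 		j -= 1
-- 	return "Funny"
-- ===== Notes on version B (the rewrite author's own statement) =====
-- stated objective: alternative
-- what changed: A builds a reversed copy of the string and runs an index loop over all n-1 positions comparing the forward difference with the reversed string's difference; B uses two converging pointers on the original string (no reversed copy, no auxiliary table), comparing the difference at the front cursor with the difference at the back cursor and stopping at the middle, doing about half the comparisons.
import Mathlib
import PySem

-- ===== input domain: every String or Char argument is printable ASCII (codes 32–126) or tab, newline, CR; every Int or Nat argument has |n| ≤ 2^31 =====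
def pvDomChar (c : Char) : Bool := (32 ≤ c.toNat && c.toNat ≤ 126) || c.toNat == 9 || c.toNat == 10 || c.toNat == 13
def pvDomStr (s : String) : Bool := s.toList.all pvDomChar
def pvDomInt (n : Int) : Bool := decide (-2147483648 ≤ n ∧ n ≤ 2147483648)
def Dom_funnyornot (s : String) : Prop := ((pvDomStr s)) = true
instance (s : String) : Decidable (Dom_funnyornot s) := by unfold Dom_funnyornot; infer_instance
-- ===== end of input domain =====

-- B replaces A's full-length loop over a reversed copy of the string by a two-pointer
-- scan of the original string that meets in the middle (alternative decomposition, same O(n)).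


-- ===== PORT A =====
-- the for-loop over range(1, n) with early return "Not Funny", else "Funny"
def pvGoA (l rs : List Char) : List Int → String
  | [] => "Funny"
  | i :: rest =>
    let d1 : Int := |((PySem.List.pyGetD l i ' ').toNat : Int) - ((PySem.List.pyGetD l (i-1) ' ').toNat : Int)|
    let d2 : Int := |((PySem.List.pyGetD rs i ' ').toNat : Int) - ((PySem.List.pyGetD rs (i-1) ' ').toNat : Int)|
    if d1 ≠ d2 then "Not Funny" else pvGoA l rs rest

def funnyornot (s : String) : String :=
  let l := s.toList
  let rs := (PySem.List.slice? l none none (-1)).getD []   -- rs = s[::-1]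
  pvGoA l rs (PySem.List.pyRange 1 (l.length : Int) 1)

-- ===== PORT B =====
-- the 'while i + 1 < j' two-pointer loop of Source B
def pvGoB (l : List Char) (i j : Int) : String :=
  if _h : i + 1 < j then
    if |((PySem.List.pyGetD l (i+1) ' ').toNat : Int) - ((PySem.List.pyGetD l i ' ').toNat : Int)| ≠
       |((PySem.List.pyGetD l j ' ').toNat : Int) - ((PySem.List.pyGetD l (j-1) ' ').toNat : Int)|
    then "Not Funny"
    else pvGoB l (i+1) (j-1)
  else "Funny"
termination_by (j - i).toNat
decreasing_by omega

def funnyornot_alt (s : String) : String :=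
  pvGoB s.toList 0 ((s.toList.length : Int) - 1)

-- ===== PRECONDITION & SPEC =====
def Spec_funnyornot (s : String) (out : String) : Prop := out = funnyornot_alt s
instance (s : String) (out : String) : Decidable (Spec_funnyornot s out) := by unfold Spec_funnyornot; infer_instance

-- ===== CLAIM (what is proved, stated in full; the proofs are below) =====
def Claim_equal_funnyornot : Prop := ∀ (s : String), Dom_funnyornot s → Spec_funnyornot s (funnyornot s)

-- ===== LEMMAS AND PROOFS =====

-- the k-th adjacent difference of l (Int index, total via pyGetD)
def pvD (l : List Char) (k : Int) : Int :=
  |((PySem.List.pyGetD l (k+1) ' ').toNat : Int) - ((PySem.List.pyGetD l k ' ').toNat : Int)|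

-- A's early-exit loop returns "Funny" exactly when every step agrees
theorem pvGoA_eq_if (l rs : List Char) (is : List Int) :
    pvGoA l rs is =
      if (∀ i ∈ is,
            |((PySem.List.pyGetD l i ' ').toNat : Int) - ((PySem.List.pyGetD l (i-1) ' ').toNat : Int)|
          = |((PySem.List.pyGetD rs i ' ').toNat : Int) - ((PySem.List.pyGetD rs (i-1) ' ').toNat : Int)|)
      then "Funny" else "Not Funny" := by
  induction is with
  | nil => simp [pvGoA]
  | cons i rest ih =>
    simp only [pvGoA, ih, List.mem_cons]
    by_cases h : |((PySem.List.pyGetD l i ' ').toNat : Int) - ((PySem.List.pyGetD l (i-1) ' ').toNat : Int)|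
        = |((PySem.List.pyGetD rs i ' ').toNat : Int) - ((PySem.List.pyGetD rs (i-1) ' ').toNat : Int)| <;>
      simp [h]

-- the reversed string's difference at i is the forward difference at n-1-i
theorem pvRev (l : List Char) (i : Int) (h1 : 1 ≤ i) (h2 : i < (l.length : Int)) :
    |((PySem.List.pyGetD l.reverse i ' ').toNat : Int) - ((PySem.List.pyGetD l.reverse (i-1) ' ').toNat : Int)|
      = pvD l ((l.length : Int) - 1 - i) := by
  unfold pvD
  rw [PySem.List.pyGetD_eq_getElem _ _ (by omega) (by simp; omega),
      PySem.List.pyGetD_eq_getElem _ _ (by omega) (by simp; omega),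
      PySem.List.pyGetD_eq_getElem _ _ (by omega) (by omega),
      PySem.List.pyGetD_eq_getElem _ _ (by omega) (by omega)]
  simp only [List.getElem_reverse]
  simp only [show l.length - 1 - (i-1).toNat = l.length - i.toNat from by omega,
             show ((l.length : Int) - 1 - i + 1).toNat = l.length - i.toNat from by omega,
             show ((l.length : Int) - 1 - i).toNat = l.length - 1 - i.toNat from by omega]
  rw [abs_sub_comm]

-- B's two-pointer loop returns "Funny" exactly when every remaining front/back pair agrees
theorem pvGoB_eq (l : List Char) (i j : Int) :
    0 ≤ i → i + j = (l.length : Int) - 1 →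
    (pvGoB l i j = "Funny" ↔
      (∀ k : Int, i ≤ k → 2*k + 2 < (l.length : Int) →
        pvD l k = pvD l ((l.length : Int) - 2 - k))) := by
  induction i, j using pvGoB.induct l with
  | case1 i j h hd =>
    intro _hi hj
    rw [pvGoB, dif_pos h, if_pos hd]
    constructor
    · intro hc; exact absurd hc (by decide)
    · intro hall; exfalso
      have hk := hall i le_rfl (by omega)
      unfold pvD at hk
      rw [show (l.length : Int) - 2 - i = j - 1 from by omega,
          show j - 1 + 1 = j from by omega] at hk
      exact hd hk
  | case2 i j h hd ih =>
    intro hi hj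
    rw [pvGoB, dif_pos h, if_neg hd]
    rw [ih (by omega) (by omega)]
    rw [not_ne_iff] at hd
    constructor
    · intro hall k hk hk2
      rcases eq_or_lt_of_le hk with rfl | _hlt
      · unfold pvD
        rw [show (l.length : Int) - 2 - i = j - 1 from by omega,
            show j - 1 + 1 = j from by omega]
        exact hd
      · exact hall k (by omega) hk2
    · intro hall k hk hk2
      exact hall k (by omega) hk2
  | case3 i j h =>
    intro hi hj
    rw [pvGoB, dif_neg h]
    constructor
    · intro _ k hk hk2; exfalso; omega
    · intro _; rfl

-- B's result is always one of the two strings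
theorem pvGoB_cases (l : List Char) (i j : Int) :
    pvGoB l i j = "Funny" ∨ pvGoB l i j = "Not Funny" := by
  induction i, j using pvGoB.induct l with
  | case1 i j h hd => rw [pvGoB, dif_pos h, if_pos hd]; right; rfl
  | case2 i j h hd ih => rw [pvGoB, dif_pos h, if_neg hd]; exact ih
  | case3 i j h => rw [pvGoB, dif_neg h]; left; rfl

-- A's full-range condition is equivalent to B's half-range condition
theorem pvCond_iff (l : List Char) :
    (∀ k : Int, 0 ≤ k → k + 1 < (l.length : Int) → pvD l k = pvD l ((l.length : Int) - 2 - k)) ↔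
    (∀ k : Int, 0 ≤ k → 2*k + 2 < (l.length : Int) → pvD l k = pvD l ((l.length : Int) - 2 - k)) := by
  constructor
  · intro hall k hk hk2; exact hall k hk (by omega)
  · intro hhalf k hk hk2
    by_cases hc : 2*k + 2 < (l.length : Int)
    · exact hhalf k hk hc
    · by_cases he : 2*k + 2 = (l.length : Int)
      · rw [show (l.length : Int) - 2 - k = k from by omega]
      · have h3 : 2*((l.length : Int) - 2 - k) + 2 < (l.length : Int) := by omega
        have := hhalf ((l.length : Int) - 2 - k) (by omega) h3
        rw [show (l.length : Int) - 2 - ((l.length : Int) - 2 - k) = k from by omega] at this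
        exact this.symm

-- ===== VERDICT (by name: the statement is the Claim_ definition above) =====
theorem funnyornot_spec : Claim_equal_funnyornot := by
  intro s _
  unfold Spec_funnyornot
  simp only [funnyornot, funnyornot_alt]
  rw [PySem.List.slice?_none_none_neg_one]
  set l := s.toList
  rw [pvGoA_eq_if]
  simp only [Option.getD_some]
  have hA : (∀ i ∈ PySem.List.pyRange 1 (l.length : Int) 1,
        |((PySem.List.pyGetD l i ' ').toNat : Int) - ((PySem.List.pyGetD l (i-1) ' ').toNat : Int)|
      = |((PySem.List.pyGetD l.reverse i ' ').toNat : Int) - ((PySem.List.pyGetD l.reverse (i-1) ' ').toNat : Int)|)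
      ↔ (∀ k : Int, 0 ≤ k → k + 1 < (l.length : Int) → pvD l k = pvD l ((l.length : Int) - 2 - k)) := by
    constructor
    · intro hall k hk hk2
      have := hall (k+1) (by rw [PySem.List.mem_pyRange_one]; omega)
      rw [pvRev l (k+1) (by omega) (by omega)] at this
      rw [show (k+1) - 1 = k from by omega] at this
      unfold pvD at this ⊢
      rw [show (l.length : Int) - 2 - k = (l.length : Int) - 1 - (k+1) from by omega]
      exact this
    · intro hall i hi
      rw [PySem.List.mem_pyRange_one] at hi
      rw [pvRev l i hi.1 hi.2]
      have := hall (i-1) (by omega) (by omega)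
      unfold pvD at this ⊢
      rw [show i - 1 + 1 = i from by omega] at this
      rw [show (l.length : Int) - 2 - (i-1) = (l.length : Int) - 1 - i from by omega] at this
      exact this
  have hB := pvGoB_eq l 0 ((l.length : Int) - 1) le_rfl (by omega)
  split_ifs with hc
  · exact ((pvGoB_eq l 0 ((l.length : Int) - 1) le_rfl (by omega)).mpr
      (fun k hk hk2 => (pvCond_iff l).mp (hA.mp hc) k hk hk2)).symm
  · rcases pvGoB_cases l 0 ((l.length : Int) - 1) with hf | hnf
    · exfalso
      exact hc (hA.mpr ((pvCond_iff l).mpr (hB.mp hf)))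
    · exact hnf.symm
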